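-- pv_equiv track=rewrite | github.com/MrBrantCode/unitest_baseline | mut_generate/mist_train_cf/cf_46415/solution.py | calculate_container_size
-- ===== SOURCE A (Python) =====
-- def calculate_container_size(precipitations, water_usages):
--     diffs = [rain - usage for rain, usage in zip(precipitations, water_usages)]
--     container_size = 0
--     running_total = 0
--
--     for diff in diffs:
--         running_total += diff
--         if running_total < container_size:
--             container_size = running_total
--         if running_total > 0:
--             running_total = 0
--
--     return -container_size
-- ===== SOURCE B (Python) =====
-- def calculate_container_size(precipitations, water_usages):
--     prefix = 0
--     max_prefix = 0
--     container = 0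
--     for rain, usage in zip(precipitations, water_usages):
--         prefix += rain - usage
--         if prefix > max_prefix:
--             max_prefix = prefix
--         deficit = max_prefix - prefix
--         if deficit > container:
--             container = deficit
--     return container
-- ===== Notes on version B (the rewrite author's own statement) =====
-- stated objective: alternative
-- what changed: Replaces the clamp-to-zero Kadane accumulator (reset running total, track minimum) with a prefix-sum pass that maintains the running maximum prefix and reports the largest drop max_prefix - prefix.
import Mathlib
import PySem

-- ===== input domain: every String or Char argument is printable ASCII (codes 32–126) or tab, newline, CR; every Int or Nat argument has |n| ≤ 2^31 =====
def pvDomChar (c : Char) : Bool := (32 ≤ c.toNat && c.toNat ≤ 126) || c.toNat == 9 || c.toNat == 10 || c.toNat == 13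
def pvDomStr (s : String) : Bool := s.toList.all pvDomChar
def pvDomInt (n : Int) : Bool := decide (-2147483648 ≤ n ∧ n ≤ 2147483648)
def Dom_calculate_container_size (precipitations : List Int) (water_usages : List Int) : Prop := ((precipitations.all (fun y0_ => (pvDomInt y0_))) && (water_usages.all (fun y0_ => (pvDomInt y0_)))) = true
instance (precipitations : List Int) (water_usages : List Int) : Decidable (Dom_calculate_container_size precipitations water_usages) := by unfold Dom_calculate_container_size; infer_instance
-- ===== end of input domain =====

-- B replaces A's clamp-to-zero running-total accumulation with a prefix-sum /
-- running-max-prefix pass (same O(n) cost, different maintained state); return values only.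


-- ===== PORT A =====
-- A: diffs from zip, then fold with (container_size, running_total), resetting to 0 when positive.
def calculate_container_size (precipitations : List Int) (water_usages : List Int) : Int :=
  let diffs := (precipitations.zip water_usages).map (fun p => p.1 - p.2)
  let st := diffs.foldl (fun (acc : Int × Int) diff =>
    let rt := acc.2 + diff
    let cs := if rt < acc.1 then rt else acc.1
    (cs, if rt > 0 then 0 else rt)) (0, 0)
  (-st.1)

-- ===== PORT B =====
-- B: one pass over the zip with (prefix, max_prefix, container).
def calculate_container_size_alt (precipitations : List Int) (water_usages : List Int) : Int :=
  let st := (precipitations.zip water_usages).foldl (fun (acc : Int × Int × Int) pu =>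
    let p := acc.1 + (pu.1 - pu.2)
    let mp := if p > acc.2.1 then p else acc.2.1
    let c := if mp - p > acc.2.2 then mp - p else acc.2.2
    (p, mp, c)) (0, 0, 0)
  st.2.2

-- ===== PRECONDITION & SPEC =====
def Spec_calculate_container_size (precipitations : List Int) (water_usages : List Int) (out : Int) : Prop := out = calculate_container_size_alt precipitations water_usages
instance (precipitations : List Int) (water_usages : List Int) (out : Int) : Decidable (Spec_calculate_container_size precipitations water_usages out) := by unfold Spec_calculate_container_size; infer_instance

-- ===== CLAIM (what is proved, stated in full; the proofs are below) =====
def Claim_equal_calculate_container_size : Prop := ∀ (precipitations : List Int) (water_usages : List Int), Dom_calculate_container_size precipitations water_usages → Spec_calculate_container_size precipitations water_usages (calculate_container_size precipitations water_usages)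

-- ===== LEMMAS AND PROOFS =====

-- Loop invariant: running_total = prefix - max_prefix and container_size = -container.
theorem fold_invariant (l : List (Int × Int)) :
    ∀ (cs rt p mp c : Int), rt = p - mp → cs = -c → p ≤ mp → 0 ≤ c →
    -(l.foldl (fun (acc : Int × Int) pu =>
        let rt := acc.2 + (pu.1 - pu.2)
        let cs := if rt < acc.1 then rt else acc.1
        (cs, if rt > 0 then 0 else rt)) (cs, rt)).1
    = (l.foldl (fun (acc : Int × Int × Int) pu =>
        let p := acc.1 + (pu.1 - pu.2)
        let mp := if p > acc.2.1 then p else acc.2.1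
        let c := if mp - p > acc.2.2 then mp - p else acc.2.2
        (p, mp, c)) (p, mp, c)).2.2 := by
  induction l with
  | nil => intro cs rt p mp c h1 h2 h3 h4; simp [List.foldl]; omega
  | cons hd tl ih =>
    intro cs rt p mp c h1 h2 h3 h4
    simp only [List.foldl]
    apply ih <;> split_ifs <;> omega

-- ===== VERDICT (by name: the statement is the Claim_ definition above) =====
theorem calculate_container_size_spec : Claim_equal_calculate_container_size := by
  intro pr wu _
  unfold Spec_calculate_container_size calculate_container_size calculate_container_size_alt
  simp only [List.foldl_map]
  exact fold_invariant (pr.zip wu) 0 0 0 0 0 rfl rfl le_rfl le_rfl
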